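-- pv_equiv track=rewrite | github.com/RoyZry98/RepCaM-Pytorch | src/utility.py | make_testChunk
-- ===== SOURCE A (Python) =====
-- def make_testChunk(length, filename, segnum=3, fps=30):
--     if segnum == 3:
--         if length == '45s':
--             if int(filename)<=150 or 1351 <= int(filename) <= 1365:
--                 flag = 0
--             elif 151 <= int(filename) <= 300 or 1366 <= int(filename) <= 1380:
--                 flag = 1
--             elif 301 <= int(filename) <= 450 or 1381 <= int(filename) <= 1395:
--                 flag = 2
--             elif 451 <= int(filename) <= 600 or 1396 <= int(filename) <= 1410:
--                 flag = 3
--             elif 601 <= int(filename) <= 750 or 1411 <= int(filename) <= 1425: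
--                 flag = 4
--             elif 751 <= int(filename) <= 900 or 1426 <= int(filename) <= 1440:
--                 flag = 5
--             elif 901 <= int(filename) <= 1050 or 1441 <= int(filename) <= 1455:
--                 flag = 6
--             elif 1051 <= int(filename) <= 1200 or 1456 <= int(filename) <= 1470:
--                 flag = 7
--             elif 1201 <= int(filename) <= 1350 or 1471 <= int(filename) <= 1485:
--                 flag = 8
--             else:
--                 flag = 9
--             return flag
--         elif length =='15s':
--             if 1 <= int(filename)<=150 or 451 <= int(filename) <= 465:
--                 flag = 0
--             elif 151 <= int(filename) <= 300 or 466 <= int(filename) <= 480: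
--                 flag = 1
--             elif 301 <= int(filename) <= 450 or 481 <= int(filename) <= 495:
--                 flag = 2
--             else:
--                 flag = 3
--             return flag
--         elif length == '30s':
--             if int(filename)<=150 or 901 <= int(filename) <= 915:
--                 flag = 0
--             elif 151 <= int(filename) <= 300 or 916 <= int(filename) <= 930:
--                 flag = 1
--             elif 301 <= int(filename) <= 450 or 931 <= int(filename) <= 945:
--                 flag = 2
--             elif 451 <= int(filename) <= 600 or 946 <= int(filename) <= 960:
--                 flag = 3
--             elif 601 <= int(filename) <= 750 or 961 <= int(filename) <= 975:
--                 flag = 4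
--             elif 751 <= int(filename) <= 900 or 976 <= int(filename) <= 990:
--                 flag = 5
--             else:
--                 flag = 6
--             return flag
--     else:
--         if length == '15s':
--             seg_size = int(int(15*fps)/segnum)
--             test_seg_size = int(45/segnum)
--             flag = None
--             for i in range(segnum):
--                 if i*seg_size <= int(filename) <= (i+1)*seg_size or 450 + i*test_seg_size <= int(filename) <= 450 + (i+1)*test_seg_size:
--                     flag = i
--                     break
--             if not flag: flag = segnum
--             return flag
--         if length == '45s':
--             seg_size = int(int(45*fps)/segnum)
--             test_seg_size = int(135/segnum)
--             flag = None
--             for i in range(segnum):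
--                 if i*seg_size <= int(filename) <= (i+1)*seg_size or 1365 + i*test_seg_size <= int(filename) <= 1365 + (i+1)*test_seg_size:
--                     flag = i
--                     break
--             if not flag: flag = segnum
--             return flag
-- ===== SOURCE B (Python) =====
-- def _tdiv(a, b):
--     # truncating integer division; equals int(a / b) for |a|, |b| < 2**53
--     q = abs(a) // abs(b)
--     return q if (a < 0) == (b < 0) else -q
--
--
-- def make_testChunk(length, filename, segnum=3, fps=30):
--     if segnum == 3:
--         # (open_low?, main_hi, test_lo, test_hi, default) per clip length
--         tables = {'45s': (None, 1350, 1351, 1485, 9),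
--                   '15s': (1,    450,  451,  495,  3),
--                   '30s': (None, 900,  901,  990,  6)}
--         if length not in tables:
--             return None
--         lo, main_hi, test_lo, test_hi, default = tables[length]
--         v = int(filename)
--         if (lo is None or lo <= v) and v <= 150:
--             return 0
--         if 151 <= v <= main_hi:
--             return (v - 151) // 150 + 1
--         if test_lo <= v <= test_hi:
--             return (v - test_lo) // 15
--         return default
--     if length == '15s':
--         dur, test_len, base = 15, 45, 450
--     elif length == '45s':
--         dur, test_len, base = 45, 135, 1365
--     else:
--         return None
--     s = _tdiv(dur * fps, segnum)
--     t = _tdiv(test_len, segnum)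
--     hit = next((i for i in range(segnum)
--                 if i * s <= int(filename) <= (i + 1) * s
--                 or base + i * t <= int(filename) <= base + (i + 1) * t), None)
--     return hit or segnum
-- ===== Notes on version B (the rewrite author's own statement) =====
-- stated objective: simpler
-- what changed: The three hardcoded 25-branch if-elif chains for segnum==3 are replaced by a per-length table of interval bounds plus closed-form division arithmetic ((v-151)//150+1, (v-lo)//15), and the general-segnum break-loop is replaced by a lazy first-match next() over a generator with an integer truncating-division helper instead of float division.
import Mathlib
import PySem

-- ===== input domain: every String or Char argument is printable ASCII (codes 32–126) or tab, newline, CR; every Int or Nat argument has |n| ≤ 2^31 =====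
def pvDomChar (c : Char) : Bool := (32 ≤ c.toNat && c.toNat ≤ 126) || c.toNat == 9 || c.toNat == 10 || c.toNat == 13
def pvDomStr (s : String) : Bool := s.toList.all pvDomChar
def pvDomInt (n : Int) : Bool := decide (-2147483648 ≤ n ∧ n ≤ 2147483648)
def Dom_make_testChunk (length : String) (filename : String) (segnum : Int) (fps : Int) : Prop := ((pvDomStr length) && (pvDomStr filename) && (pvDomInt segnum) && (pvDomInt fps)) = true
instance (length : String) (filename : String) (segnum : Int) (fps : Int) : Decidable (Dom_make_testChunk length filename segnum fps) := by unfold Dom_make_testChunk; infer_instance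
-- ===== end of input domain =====

-- B replaces A's hard-coded if-elif chains by closed-form interval arithmetic over a per-length
-- table and the general-segnum break-loop by a first-match search; objective: simpler.


-- ===== PORT A =====
-- A's `for i in range(segnum): if … : flag = i; break` loop; int(filename) is evaluated inside
-- the loop condition (so an unparseable filename is only reached when the loop runs, segnum > 0).
def pvLoopA (filename : String) (segSize testSegSize base segnum : Int) : Option Int :=
  (PySem.List.pyRange 0 segnum 1).foldl (fun acc i =>
    match acc with
    | some _ => acc          -- `break`: keep the found flag
    | none =>
      match PySem.Int.ofStr? filename with
      | some v =>
        if (i * segSize ≤ v ∧ v ≤ (i + 1) * segSize) ∨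
           (base + i * testSegSize ≤ v ∧ v ≤ base + (i + 1) * testSegSize)
        then some i else none
      | none => none) none   -- int(filename) raises: excluded by Pre_ when segnum > 0

def make_testChunk (length : String) (filename : String) (segnum : Int) (fps : Int) : Option Int :=
  if segnum = 3 then
    if length = "45s" then
      match PySem.Int.ofStr? filename with
      | none => none         -- ValueError: excluded by Pre_
      | some n =>
        some (if n ≤ 150 ∨ (1351 ≤ n ∧ n ≤ 1365) then 0
          else if (151 ≤ n ∧ n ≤ 300) ∨ (1366 ≤ n ∧ n ≤ 1380) then 1
          else if (301 ≤ n ∧ n ≤ 450) ∨ (1381 ≤ n ∧ n ≤ 1395) then 2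
          else if (451 ≤ n ∧ n ≤ 600) ∨ (1396 ≤ n ∧ n ≤ 1410) then 3
          else if (601 ≤ n ∧ n ≤ 750) ∨ (1411 ≤ n ∧ n ≤ 1425) then 4
          else if (751 ≤ n ∧ n ≤ 900) ∨ (1426 ≤ n ∧ n ≤ 1440) then 5
          else if (901 ≤ n ∧ n ≤ 1050) ∨ (1441 ≤ n ∧ n ≤ 1455) then 6
          else if (1051 ≤ n ∧ n ≤ 1200) ∨ (1456 ≤ n ∧ n ≤ 1470) then 7
          else if (1201 ≤ n ∧ n ≤ 1350) ∨ (1471 ≤ n ∧ n ≤ 1485) then 8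
          else 9)
    else if length = "15s" then
      match PySem.Int.ofStr? filename with
      | none => none
      | some n =>
        some (if (1 ≤ n ∧ n ≤ 150) ∨ (451 ≤ n ∧ n ≤ 465) then 0
          else if (151 ≤ n ∧ n ≤ 300) ∨ (466 ≤ n ∧ n ≤ 480) then 1
          else if (301 ≤ n ∧ n ≤ 450) ∨ (481 ≤ n ∧ n ≤ 495) then 2
          else 3)
    else if length = "30s" then
      match PySem.Int.ofStr? filename with
      | none => none
      | some n =>
        some (if n ≤ 150 ∨ (901 ≤ n ∧ n ≤ 915) then 0
          else if (151 ≤ n ∧ n ≤ 300) ∨ (916 ≤ n ∧ n ≤ 930) then 1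
          else if (301 ≤ n ∧ n ≤ 450) ∨ (931 ≤ n ∧ n ≤ 945) then 2
          else if (451 ≤ n ∧ n ≤ 600) ∨ (946 ≤ n ∧ n ≤ 960) then 3
          else if (601 ≤ n ∧ n ≤ 750) ∨ (961 ≤ n ∧ n ≤ 975) then 4
          else if (751 ≤ n ∧ n ≤ 900) ∨ (976 ≤ n ∧ n ≤ 990) then 5
          else 6)
    else none                -- falls off the function: implicit None
  else
    if length = "15s" then
      if segnum = 0 then none  -- ZeroDivisionError: excluded by Pre_
      else
        let seg_size := PySem.Int.truncdiv (15 * fps) segnum   -- int(int(15*fps)/segnum); exact on Dom (|15*fps| < 2^53)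
        let test_seg_size := PySem.Int.truncdiv 45 segnum
        match pvLoopA filename seg_size test_seg_size 450 segnum with
        | none => some segnum                                  -- `if not flag: flag = segnum`
        | some f => some (if f = 0 then segnum else f)
    else if length = "45s" then
      if segnum = 0 then none
      else
        let seg_size := PySem.Int.truncdiv (45 * fps) segnum
        let test_seg_size := PySem.Int.truncdiv 135 segnum
        match pvLoopA filename seg_size test_seg_size 1365 segnum with
        | none => some segnum
        | some f => some (if f = 0 then segnum else f)
    else none

-- ===== PORT B =====
-- _tdiv(a, b): truncating division q = abs(a)//abs(b), signed
def pvTdiv (a b : Int) : Int :=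
  let q : Int := PySem.Int.floordiv |a| |b|
  if (decide (a < 0)) = (decide (b < 0)) then q else -q

def make_testChunk_alt (length : String) (filename : String) (segnum : Int) (fps : Int) : Option Int :=
  if segnum = 3 then
    -- tables[length] = (open_low?, main_hi, test_lo, test_hi, default)
    let tbl : Option (Option Int × Int × Int × Int × Int) :=
      if length = "45s" then some (none, 1350, 1351, 1485, 9)
      else if length = "15s" then some (some 1, 450, 451, 495, 3)
      else if length = "30s" then some (none, 900, 901, 990, 6)
      else none
    match tbl with
    | none => none                       -- `length not in tables`
    | some (lo, mainHi, testLo, testHi, dflt) =>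
      match PySem.Int.ofStr? filename with
      | none => none                     -- ValueError: excluded by Pre_
      | some v =>
        if (∀ l ∈ lo, l ≤ v) ∧ v ≤ 150 then some 0
        else if 151 ≤ v ∧ v ≤ mainHi then some (PySem.Int.floordiv (v - 151) 150 + 1)
        else if testLo ≤ v ∧ v ≤ testHi then some (PySem.Int.floordiv (v - testLo) 15)
        else some dflt
  else
    let params : Option (Int × Int × Int) :=
      if length = "15s" then some (15, 45, 450)
      else if length = "45s" then some (45, 135, 1365)
      else none
    match params with
    | none => none
    | some (dur, testLen, base) =>
      if segnum = 0 then none            -- _tdiv's ZeroDivisionError: excluded by Pre_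
      else
        let s := pvTdiv (dur * fps) segnum
        let t := pvTdiv testLen segnum
        -- next((i for i in range(segnum) if …), None); int(filename) evaluated lazily inside
        let hit := (PySem.List.pyRange 0 segnum 1).find? fun i =>
          match PySem.Int.ofStr? filename with
          | some v => decide ((i * s ≤ v ∧ v ≤ (i + 1) * s) ∨
                              (base + i * t ≤ v ∧ v ≤ base + (i + 1) * t))
          | none => false
        match hit with                   -- `hit or segnum`
        | none => some segnum
        | some i => some (if i = 0 then segnum else i)

-- ===== PRECONDITION & SPEC =====
-- Pre_ excludes exactly the inputs where A raises: ValueError from int(filename) when it is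
-- actually evaluated, and ZeroDivisionError when segnum == 0 in the general branch.
def Pre_make_testChunk (length : String) (filename : String) (segnum : Int) (fps : Int) : Prop :=
  (segnum = 3 → (length = "45s" ∨ length = "15s" ∨ length = "30s") →
      (PySem.Int.ofStr? filename).isSome = true)
  ∧ (segnum ≠ 3 → (length = "15s" ∨ length = "45s") →
      segnum ≠ 0 ∧ (0 < segnum → (PySem.Int.ofStr? filename).isSome = true))
instance (length : String) (filename : String) (segnum : Int) (fps : Int) : Decidable (Pre_make_testChunk length filename segnum fps) := by unfold Pre_make_testChunk; infer_instance

def pvWitness_make_testChunk : String × String × Int × Int := ("45s", "200", 3, 30)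

def Spec_make_testChunk (length : String) (filename : String) (segnum : Int) (fps : Int) (out : Option Int) : Prop := out = make_testChunk_alt length filename segnum fps
instance (length : String) (filename : String) (segnum : Int) (fps : Int) (out : Option Int) : Decidable (Spec_make_testChunk length filename segnum fps out) := by unfold Spec_make_testChunk; infer_instance

-- ===== CLAIM (what is proved, stated in full; the proofs are below) =====
def Claim_equal_make_testChunk : Prop := ∀ (length : String) (filename : String) (segnum : Int) (fps : Int), Dom_make_testChunk length filename segnum fps → Pre_make_testChunk length filename segnum fps → Spec_make_testChunk length filename segnum fps (make_testChunk length filename segnum fps)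

-- ===== LEMMAS AND PROOFS =====
theorem pvTdiv_eq (a b : Int) : pvTdiv a b = PySem.Int.truncdiv a b := by
  unfold pvTdiv PySem.Int.truncdiv
  rcases a with m | m <;> rcases b with n | n <;>
    simp [Int.tdiv, PySem.Int.floordiv, Int.negSucc_eq, abs_of_nonneg, abs_of_nonpos,
      Int.fdiv_eq_ediv] <;> intros <;> (try split_ifs) <;> omega

-- A's break-loop equals first-match search, for any predicate
theorem foldl_break_stay (p : Int → Bool) (l : List Int) (y : Int) :
    l.foldl (fun acc i => match acc with
      | some _ => acc
      | none => if p i = true then some i else none) (some y) = some y := by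
  induction l with
  | nil => rfl
  | cons x xs ih => simpa using ih

theorem foldl_break_eq_find? (p : Int → Bool) (l : List Int) :
    l.foldl (fun acc i => match acc with
      | some _ => acc
      | none => if p i = true then some i else none) none = l.find? p := by
  induction l with
  | nil => rfl
  | cons x xs ih =>
    rw [List.foldl_cons, List.find?]
    by_cases hp : p x = true
    · simp only [hp]
      exact foldl_break_stay p xs x
    · simp only [hp, Bool.false_eq_true, if_false]
      exact ih

theorem pvLoopA_eq_find? (filename : String) (s t base segnum : Int) :
    pvLoopA filename s t base segnum =
      (PySem.List.pyRange 0 segnum 1).find? fun i =>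
        match PySem.Int.ofStr? filename with
        | some v => decide ((i * s ≤ v ∧ v ≤ (i + 1) * s) ∨
                            (base + i * t ≤ v ∧ v ≤ base + (i + 1) * t))
        | none => false := by
  unfold pvLoopA
  rw [← foldl_break_eq_find?]
  congr 1
  funext acc i
  cases acc <;> cases h : PySem.Int.ofStr? filename <;> simp [h]

theorem make_testChunk_spec : Claim_equal_make_testChunk := by
  intro length filename segnum fps _hdom hpre
  unfold Spec_make_testChunk make_testChunk make_testChunk_alt
  obtain ⟨hpre3, hpreE⟩ := hpre
  by_cases h3 : segnum = 3
  · subst h3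
    by_cases h45 : length = "45s"
    · obtain ⟨v, hv⟩ := Option.isSome_iff_exists.mp (hpre3 rfl (Or.inl h45))
      subst h45
      simp only [hv, String.reduceEq, reduceIte, Option.not_mem_none, forall_const, true_and, IsEmpty.forall_iff]
      rw [show PySem.Int.floordiv (v - 151) 150 = (v - 151) / 150 from
            PySem.Int.floordiv_eq_ediv_of_pos (by norm_num),
          show PySem.Int.floordiv (v - 1351) 15 = (v - 1351) / 15 from
            PySem.Int.floordiv_eq_ediv_of_pos (by norm_num)]
      split_ifs <;> simp only [Option.some.injEq] <;> omega
    · by_cases h15 : length = "15s"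
      · obtain ⟨v, hv⟩ := Option.isSome_iff_exists.mp (hpre3 rfl (Or.inr (Or.inl h15)))
        subst h15
        simp only [hv, String.reduceEq, reduceIte, forall_eq', Option.mem_def, Option.some.injEq]
        rw [show PySem.Int.floordiv (v - 151) 150 = (v - 151) / 150 from
              PySem.Int.floordiv_eq_ediv_of_pos (by norm_num),
            show PySem.Int.floordiv (v - 451) 15 = (v - 451) / 15 from
              PySem.Int.floordiv_eq_ediv_of_pos (by norm_num)]
        split_ifs <;> simp only [Option.some.injEq] <;> omega
      · by_cases h30 : length = "30s"
        · obtain ⟨v, hv⟩ := Option.isSome_iff_exists.mp (hpre3 rfl (Or.inr (Or.inr h30)))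
          subst h30
          simp only [hv, String.reduceEq, reduceIte, Option.not_mem_none, forall_const, true_and, IsEmpty.forall_iff]
          rw [show PySem.Int.floordiv (v - 151) 150 = (v - 151) / 150 from
                PySem.Int.floordiv_eq_ediv_of_pos (by norm_num),
              show PySem.Int.floordiv (v - 901) 15 = (v - 901) / 15 from
                PySem.Int.floordiv_eq_ediv_of_pos (by norm_num)]
          split_ifs <;> simp only [Option.some.injEq] <;> omega
        · simp [h45, h15, h30]
  · simp only [if_neg h3]
    by_cases h15 : length = "15s"
    · obtain ⟨hz, _⟩ := hpreE h3 (Or.inl h15)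
      subst h15
      simp only [String.reduceEq, reduceIte, if_neg hz]
      rw [pvLoopA_eq_find?, pvTdiv_eq, pvTdiv_eq]
    · by_cases h45 : length = "45s"
      · obtain ⟨hz, _⟩ := hpreE h3 (Or.inr h45)
        subst h45
        simp only [String.reduceEq, reduceIte, if_neg hz]
        rw [pvLoopA_eq_find?, pvTdiv_eq, pvTdiv_eq]
      · simp [h15, h45]
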